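-- pv_equiv track=rewrite | github.com/pypi-data/pypi-mirror-399 | packages/chemistryai/chemistryai-0.2.4.tar.gz/chemistryai-0.2.4/chemistryai/chem_algo.py | group_halogens
-- ===== SOURCE A (Python) =====
-- from collections import defaultdict
--
-- def group_halogens(fg_distances):
--     grouped = defaultdict(int)
--     for acid, symbol, dist in fg_distances:
--         grouped[(acid, symbol, dist)] += 1
--     result = []
--     for (acid, symbol, dist), count in grouped.items():
--         new_label = symbol
--         if count > 1:
--             new_label = f"{count}-{symbol}"
--         result.append((acid, new_label, dist))
--     return result
-- ===== SOURCE B (Python) =====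
-- def group_halogens(fg_distances):
--     items = [(acid, symbol, dist) for acid, symbol, dist in fg_distances]
--     result = []
--     pending = items
--     while pending:
--         key = pending[0]
--         rest = [t for t in pending if t != key]
--         n = len(pending) - len(rest)
--         acid, symbol, dist = key
--         result.append((acid, f"{n}-{symbol}" if n > 1 else symbol, dist))
--         pending = rest
--     return result
-- ===== Notes on version B (the rewrite author's own statement) =====
-- stated objective: alternative
-- what changed: Replaces the counter-dict two-pass grouping by a repeated-partition loop: take the first pending element as the key, filter all its occurrences out of the pending list, derive its multiplicity from the length drop, emit it labelled, and continue on the shrunken remainder; no dict and no seen-set is kept.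
import Mathlib
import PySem

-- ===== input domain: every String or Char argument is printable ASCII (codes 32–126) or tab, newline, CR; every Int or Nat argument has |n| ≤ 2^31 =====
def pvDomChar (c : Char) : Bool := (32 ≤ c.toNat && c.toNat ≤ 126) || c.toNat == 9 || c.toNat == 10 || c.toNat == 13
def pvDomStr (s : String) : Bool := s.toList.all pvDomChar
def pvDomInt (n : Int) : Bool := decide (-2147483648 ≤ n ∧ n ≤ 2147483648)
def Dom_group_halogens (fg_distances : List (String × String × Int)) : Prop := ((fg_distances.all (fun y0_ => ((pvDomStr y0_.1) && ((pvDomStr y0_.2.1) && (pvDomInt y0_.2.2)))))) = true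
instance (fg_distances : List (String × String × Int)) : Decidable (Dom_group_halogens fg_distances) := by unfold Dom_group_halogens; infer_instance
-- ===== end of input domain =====

-- B replaces the counter-dict grouping by a repeated-partition loop (take first key, filter
-- out all its occurrences, read the count off the length drop); alternative decomposition, not faster.

-- ===== PORT A =====
-- grouped = defaultdict(int); grouped[(acid,symbol,dist)] += 1  →  Dict.modify with default 0
def group_halogens (fg_distances : List (String × String × Int)) : List (String × String × Int) :=
  let grouped : PySem.Dict (String × String × Int) Int :=
    fg_distances.foldl (fun d x => d.modify x 0 (· + 1)) PySem.Dict.empty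
  let result : List (String × String × Int) :=
    grouped.items.foldl
      (fun r p =>
        r ++ [(p.1.1,
               if p.2 > 1 then PySem.Int.toStr p.2 ++ "-" ++ p.1.2.1 else p.1.2.1,
               p.1.2.2)]) []
  result

-- ===== PORT B =====
-- the while loop: pending shrinks by filtering out every occurrence of its first element
def pvAltLoop (pending : List (String × String × Int)) (result : List (String × String × Int)) :
    List (String × String × Int) :=
  match pending with
  | [] => result
  | key :: tl =>
    let rest := (key :: tl).filter (fun t => t ≠ key)
    let n : Int := (key :: tl).length - rest.length
    pvAltLoop rest
      (result ++ [(key.1, if n > 1 then PySem.Int.toStr n ++ "-" ++ key.2.1 else key.2.1, key.2.2)])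
termination_by pending.length
decreasing_by
  simp only [List.filter]
  have : (decide ¬key = key) = false := by simp
  rw [this]
  exact Nat.lt_succ_of_le (List.length_filter_le _ _)

def group_halogens_alt (fg_distances : List (String × String × Int)) : List (String × String × Int) :=
  let items : List (String × String × Int) := fg_distances.map (fun x => (x.1, x.2.1, x.2.2))
  pvAltLoop items []

-- ===== PRECONDITION & SPEC =====
def Spec_group_halogens (fg_distances : List (String × String × Int)) (out : List (String × String × Int)) : Prop := out = group_halogens_alt fg_distances
instance (fg_distances : List (String × String × Int)) (out : List (String × String × Int)) : Decidable (Spec_group_halogens fg_distances out) := by unfold Spec_group_halogens; infer_instance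

-- ===== CLAIM (what is proved, stated in full; the proofs are below) =====
def Claim_equal_group_halogens : Prop := ∀ (fg_distances : List (String × String × Int)), Dom_group_halogens fg_distances → Spec_group_halogens fg_distances (group_halogens fg_distances)

-- ===== LEMMAS AND PROOFS =====

-- the label both programs attach to a key, with the count taken in the list `items`
def pvLabel (items : List (String × String × Int)) (x : String × String × Int) : String × String × Int :=
  (x.1, if (items.count x : Int) > 1 then PySem.Int.toStr (items.count x : Int) ++ "-" ++ x.2.1 else x.2.1, x.2.2)

-- Set.update past a fresh head: the head is emitted once, its later occurrences are inert
theorem pv_update_cons (l : List (String × String × Int)) (a : String × String × Int) :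
    ∀ s : List (String × String × Int), PySem.Set.update (a :: s) l = a :: PySem.Set.update s (l.filter (fun t => t ≠ a)) := by
  induction l with
  | nil => intro s; simp [PySem.Set.update]
  | cons y l ih =>
    intro s
    simp only [PySem.Set.update, List.foldl_cons, List.filter_cons, ne_eq, decide_not] at ih ⊢
    by_cases hya : y = a
    · subst hya
      have h1 : PySem.Set.add (y :: s) y = y :: s := by simp [PySem.Set.add]
      rw [h1, if_neg (by simp)]
      exact ih s
    · have hd : (!decide (y = a)) = true := by simp [hya]
      rw [hd, if_pos rfl, List.foldl_cons]
      by_cases hs : y ∈ s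
      · have h1 : PySem.Set.add (a :: s) y = a :: s := by simp [PySem.Set.add, hs]
        have h2 : PySem.Set.add s y = s := by simp [PySem.Set.add, hs]
        rw [h1, h2, ih s]
      · have h1 : PySem.Set.add (a :: s) y = a :: (s ++ [y]) := by
          simp [PySem.Set.add, hs, hya]
        have h2 : PySem.Set.add s y = s ++ [y] := by simp [PySem.Set.add, hs]
        rw [h1, h2, ih (s ++ [y])]

theorem pv_ofList_cons (a : String × String × Int) (tl : List (String × String × Int)) :
    PySem.Set.ofList (a :: tl) = a :: PySem.Set.ofList (tl.filter (fun t => t ≠ a)) := by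
  rw [PySem.Set.ofList_eq_foldl, PySem.Set.ofList_eq_foldl]
  show PySem.Set.update (PySem.Set.add [] a) tl = _
  have : PySem.Set.add ([] : List (String × String × Int)) a = [a] := by simp [PySem.Set.add]
  rw [this, pv_update_cons]
  rfl

-- count in the residual pending list = count in the list before the partition step
theorem pv_count_filter (l : List (String × String × Int)) (a x : String × String × Int) (h : x ≠ a) :
    (l.filter (fun t => t ≠ a)).count x = l.count x := by
  rw [List.count_filter]; simp [h]

-- the length drop of the partition step is the head's multiplicity
theorem pv_length_filter_add_count (l : List (String × String × Int)) (a : String × String × Int) :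
    l.length = (l.filter (fun t => t ≠ a)).length + l.count a := by
  induction l with
  | nil => simp
  | cons y l ih =>
    simp only [ne_eq, decide_not] at ih ⊢
    by_cases h : y = a
    · subst h; simp [ih]; omega
    · simp [h, ih]; omega

theorem pv_altLoop_eq (l res : List (String × String × Int)) :
    pvAltLoop l res = res ++ (PySem.Set.ofList l).map (pvLabel l) := by
  induction l, res using pvAltLoop.induct with
  | case1 res => simp [pvAltLoop, PySem.Set.ofList]
  | case2 res key tl rest n ih =>
    rw [pvAltLoop]
    have hrest : rest = tl.filter (fun t => t ≠ key) := by
      simp [rest]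
    have hcount : n = ((key :: tl).count key : Int) := by
      have h := pv_length_filter_add_count (key :: tl) key
      have h2 : ((key :: tl).filter (fun t => t ≠ key)).length = rest.length := rfl
      rw [h2] at h
      simp only [n]
      omega
    have hlbl : (key.1, if n > 1 then PySem.Int.toStr n ++ "-" ++ key.2.1 else key.2.1, key.2.2)
        = pvLabel (key :: tl) key := by
      rw [hcount]; rfl
    have hmapeq : List.map (pvLabel rest) (PySem.Set.ofList rest)
        = List.map (pvLabel (key :: tl)) (PySem.Set.ofList rest) := by
      apply List.map_congr_left
      intro x hx
      have hxr : x ∈ rest := (PySem.Set.mem_ofList _ _).mp hx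
      have hxk : x ≠ key := by
        rw [hrest] at hxr
        have := (List.mem_filter.mp hxr).2
        simpa using this
      unfold pvLabel
      have hc : rest.count x = (key :: tl).count x := by
        rw [hrest, pv_count_filter tl key x hxk]
        simp [Ne.symm hxk]
      rw [hc]
    have htail : res ++ [(key.1, if n > 1 then PySem.Int.toStr n ++ "-" ++ key.2.1 else key.2.1, key.2.2)]
          ++ List.map (pvLabel rest) (PySem.Set.ofList rest)
        = res ++ List.map (pvLabel (key :: tl)) (PySem.Set.ofList (key :: tl)) := by
      rw [hlbl, hmapeq, pv_ofList_cons key tl, List.map_cons, ← hrest]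
      simp
    exact ih.trans htail

theorem pv_group_eq (fg_distances : List (String × String × Int)) :
    group_halogens fg_distances = group_halogens_alt fg_distances := by
  unfold group_halogens group_halogens_alt
  have hitems : fg_distances.map (fun x : String × String × Int => (x.1, x.2.1, x.2.2)) = fg_distances := by
    have : (fun x : String × String × Int => (x.1, x.2.1, x.2.2)) = id := funext fun x => rfl
    rw [this, List.map_id]
  simp only [hitems]
  rw [pv_altLoop_eq fg_distances []]
  have hcounter : fg_distances.foldl (fun d x => d.modify x 0 (· + 1)) PySem.Dict.empty
      = PySem.Dict.counter fg_distances := (PySem.Dict.counter_eq_foldl fg_distances).symm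
  rw [hcounter, PySem.Dict.items_counter]
  rw [PySem.List.foldl_append_singleton_eq_map]
  simp [List.map_map, pvLabel, Function.comp]

-- ===== VERDICT (by name: the statement is the Claim_ definition above) =====
theorem group_halogens_spec : Claim_equal_group_halogens := by
  intro fg_distances _
  unfold Spec_group_halogens
  exact pv_group_eq fg_distances
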